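-- pv_equiv track=rewrite | github.com/pypi-data/pypi-mirror-400 | packages/microhttpx/microhttpx-0.1.0-py3-none-any.whl/microhttpx/parser.py | path_params
-- ===== SOURCE A (Python) =====
-- def path_params(route_pattern:str, path:str) -> dict:
--     path = path.split("?", 1)[0]
--
--     r_parts = route_pattern.strip("/").split("/")
--     p_parts = path.strip("/").split("/")
--
--     if len(r_parts) != len(p_parts):
--         return {}
--
--     params = {}
--     for r, p in zip(r_parts, p_parts):
--         if r.startswith("{") and r.endswith("}"):
--             params[r[1:-1]] = p
--         elif r != p:
--             return {}
--
--     return params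
-- ===== SOURCE B (Python) =====
-- def _match(tokens, s, pos, acc):
--     # consume one token, then a '/' separator before each further token
--     (val, is_param), rest = tokens[0], tokens[1:]
--     if is_param:
--         end = pos
--         while end < len(s) and s[end] != "/":
--             end += 1
--         acc[val] = s[pos:end]
--         pos = end
--     else:
--         for c in val:
--             if pos < len(s) and s[pos] == c:
--                 pos += 1
--             else:
--                 return None
--     if not rest:
--         return acc if pos == len(s) else None
--     if pos < len(s) and s[pos] == "/":
--         return _match(rest, s, pos + 1, acc)
--     return None
--
--
-- def path_params(route_pattern: str, path: str) -> dict: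
--     # Compile the route into a token list (literal text / named capture), then
--     # match the tokens against the stripped path by a single character-level scan
--     # (a hand-rolled deterministic regex: each capture is a [^/]* group).
--     s = path.split("?", 1)[0].strip("/")
--     tokens = [
--         (seg[1:-1], True) if seg.startswith("{") and seg.endswith("}") else (seg, False)
--         for seg in route_pattern.strip("/").split("/")
--     ]
--     res = _match(tokens, s, 0, {})
--     return {} if res is None else res
-- ===== Notes on version B (the rewrite author's own statement) =====
-- stated objective: alternative
-- what changed: Replaces A's split-both-then-zip segment comparison by a compile-and-match design: the route is compiled once into a token list (literal / named capture) and matched against the un-split path string by a single deterministic character-level scan, like a hand-rolled regex with [^/]* groups.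
import Mathlib
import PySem

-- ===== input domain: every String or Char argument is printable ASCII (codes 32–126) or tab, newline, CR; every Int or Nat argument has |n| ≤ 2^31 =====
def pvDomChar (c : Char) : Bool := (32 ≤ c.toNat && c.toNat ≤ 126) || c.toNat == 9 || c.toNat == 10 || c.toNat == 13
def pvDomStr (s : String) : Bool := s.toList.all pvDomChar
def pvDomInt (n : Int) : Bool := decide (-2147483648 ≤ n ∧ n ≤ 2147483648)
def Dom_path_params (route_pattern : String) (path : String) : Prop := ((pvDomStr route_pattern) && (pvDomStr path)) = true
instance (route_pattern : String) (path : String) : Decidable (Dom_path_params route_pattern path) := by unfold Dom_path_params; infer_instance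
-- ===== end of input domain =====

-- B replaces A's split-both-then-zip comparison by compile-route-to-tokens plus one
-- character-level scan of the un-split path (a hand-rolled deterministic regex): alternative, not faster.

-- ===== PORT A =====
-- A's for-loop over zip(r_parts, p_parts) with the accumulated params dict; 'return {}' is Dict.empty.
def pathParamsLoopA : List (String × String) → PySem.Dict String String → PySem.Dict String String
  | [], params => params
  | (r, p) :: rest, params =>
    if PySem.Str.startswith r "{" && PySem.Str.endswith r "}" then
      pathParamsLoopA rest (params.insert (PySem.Str.slice r (some 1) (some (-1))) p)
    else if r != p then PySem.Dict.empty
    else pathParamsLoopA rest params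

def path_params (route_pattern : String) (path : String) : List (String × String) :=
  let path := ((PySem.Str.splitMax? path "?" 1).getD []).headD ""
  let r_parts := (PySem.Str.split? (PySem.Str.stripChars route_pattern "/") "/").getD []
  let p_parts := (PySem.Str.split? (PySem.Str.stripChars path "/") "/").getD []
  if r_parts.length ≠ p_parts.length then []
  else (pathParamsLoopA (r_parts.zip p_parts) PySem.Dict.empty).items

-- ===== PORT B =====
-- the char-by-char literal loop 'for c in val: if pos < len(s) and s[pos] == c: …'
def consumeLit : List Char → List Char → Option (List Char)
  | [], cs => some cs
  | _ :: _, [] => none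
  | c :: l, x :: cs => if x = c then consumeLit l cs else none

-- _match: consume one token, then require a '/' separator before each further token;
-- the Python is never called with an empty token list ('[]' returns none, unreachable).
def bMatch : List (String × Bool) → List Char → PySem.Dict String String →
    Option (PySem.Dict String String)
  | [], _, _ => none
  | (val, isParam) :: rest, cs, acc =>
    let step : Option (List Char × PySem.Dict String String) :=
      if isParam then
        some (cs.dropWhile (· ≠ '/'),
          acc.insert val (String.ofList (cs.takeWhile (· ≠ '/'))))
      else (consumeLit val.toList cs).map (fun cs' => (cs', acc))
    match step with
    | none => none
    | some (cs', acc') =>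
      match rest with
      | [] => if cs' = [] then some acc' else none
      | _ :: _ =>
        match cs' with
        | '/' :: cs'' => bMatch rest cs'' acc'
        | _ => none

def bTokens (r_parts : List String) : List (String × Bool) :=
  r_parts.map (fun seg =>
    if PySem.Str.startswith seg "{" && PySem.Str.endswith seg "}" then
      (PySem.Str.slice seg (some 1) (some (-1)), true)
    else (seg, false))

def path_params_alt (route_pattern : String) (path : String) : List (String × String) :=
  let s := PySem.Str.stripChars (((PySem.Str.splitMax? path "?" 1).getD []).headD "") "/"
  let tokens := bTokens ((PySem.Str.split? (PySem.Str.stripChars route_pattern "/") "/").getD [])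
  match bMatch tokens s.toList PySem.Dict.empty with
  | none => []
  | some d => d.items

-- ===== PRECONDITION & SPEC =====
def Spec_path_params (route_pattern : String) (path : String) (out : List (String × String)) : Prop := out = path_params_alt route_pattern path
instance (route_pattern : String) (path : String) (out : List (String × String)) : Decidable (Spec_path_params route_pattern path out) := by unfold Spec_path_params; infer_instance

-- ===== CLAIM (what is proved, stated in full; the proofs are below) =====
def Claim_equal_path_params : Prop := ∀ (route_pattern : String) (path : String), Dom_path_params route_pattern path → Spec_path_params route_pattern path (path_params route_pattern path)

-- ===== LEMMAS AND PROOFS =====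

-- reference split on '/' (proof-only)
def ssplit : List Char → List (List Char)
  | [] => [[]]
  | c :: r => if c = '/' then [] :: ssplit r else (ssplit r).modifyHead (c :: ·)

theorem ssplit_ne_nil (cs : List Char) : ssplit cs ≠ [] := by
  induction cs with
  | nil => simp [ssplit]
  | cons c r ih =>
    simp only [ssplit]
    split
    · simp
    · cases h : ssplit r with
      | nil => exact absurd h ih
      | cons a as => simp [List.modifyHead]

theorem go_eq (fuel : Nat) (l cur : List Char) (acc : List (List Char))
    (h : l.length ≤ fuel) :
    PySem.Chars.splitOn.go ['/'] fuel l cur acc =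
      acc.reverse ++ (ssplit l).modifyHead (cur.reverse ++ ·) := by
  induction fuel generalizing l cur acc with
  | zero =>
    have : l = [] := by cases l <;> simp_all
    subst this
    simp [PySem.Chars.splitOn.go, ssplit]
  | succ fuel ih =>
    cases l with
    | nil => simp [PySem.Chars.splitOn.go, ssplit]
    | cons c r =>
      simp only [PySem.Chars.splitOn.go]
      by_cases hc : c = '/'
      · subst hc
        have hp : List.isPrefixOf ['/'] ('/' :: r) = true := by simp [List.isPrefixOf]
        rw [if_pos hp]
        have := ih r [] (cur.reverse :: acc) (by simpa using Nat.le_of_succ_le_succ h)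
        simp only [List.length_singleton, List.drop_succ_cons, List.drop_zero]
        rw [this]
        cases hr : ssplit r with
        | nil => exact absurd hr (ssplit_ne_nil r)
        | cons a as => simp [ssplit, List.modifyHead, hr]
      · have hp : List.isPrefixOf ['/'] (c :: r) = false := by
          simp [List.isPrefixOf]; exact fun hh => absurd hh.symm hc
        rw [if_neg (by simp [hp])]
        rw [ih r (c :: cur) acc (by simpa using Nat.le_of_succ_le_succ h)]
        cases hr : ssplit r with
        | nil => exact absurd hr (ssplit_ne_nil r)
        | cons a as => simp [ssplit, hc, hr, List.modifyHead]

theorem splitOn_eq_ssplit (cs : List Char) :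
    PySem.Chars.splitOn cs ['/'] = ssplit cs := by
  rw [PySem.Chars.splitOn, go_eq _ _ _ _ (by omega)]
  cases hr : ssplit cs with
  | nil => exact absurd hr (ssplit_ne_nil cs)
  | cons a as => simp [List.modifyHead]

theorem ssplit_no_slash (cs : List Char) : ∀ seg ∈ ssplit cs, '/' ∉ seg := by
  induction cs with
  | nil => simp [ssplit]
  | cons c r ih =>
    simp only [ssplit]
    split
    · simpa using ih
    · cases hr : ssplit r with
      | nil => exact absurd hr (ssplit_ne_nil r)
      | cons a as =>
        rw [hr] at ih
        intro seg hseg hm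
        simp only [List.modifyHead] at hseg
        rcases List.mem_cons.mp hseg with hx | hx
        · subst hx
          rcases List.mem_cons.mp hm with hy | hy
          · rename_i hc; exact hc hy.symm
          · exact ih a (by simp) hy
        · exact ih seg (by simp [hx]) hm

theorem dropWhile_head_slash (cs : List Char) (x : Char) (r : List Char)
    (h : cs.dropWhile (· ≠ '/') = x :: r) : x = '/' := by
  induction cs with
  | nil => simp at h
  | cons c cs ih =>
    rw [List.dropWhile_cons] at h
    by_cases hc : c = '/'
    · simp [hc] at h; exact h.1.symm
    · rw [if_pos (by simp [hc])] at h; exact ih h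

theorem ssplit_eq_of_dw_nil (cs : List Char) (h : cs.dropWhile (· ≠ '/') = []) :
    ssplit cs = [cs.takeWhile (· ≠ '/')] := by
  induction cs with
  | nil => simp [ssplit]
  | cons c r ih =>
    rw [List.dropWhile_cons] at h
    by_cases hc : c = '/'
    · rw [if_neg (by simp [hc])] at h; simp at h
    · rw [if_pos (by simp [hc])] at h
      simp [ssplit, hc, ih h, List.modifyHead]

theorem ssplit_eq_of_dw_cons (cs : List Char) (x : Char) (r2 : List Char)
    (h : cs.dropWhile (· ≠ '/') = x :: r2) :
    ssplit cs = cs.takeWhile (· ≠ '/') :: ssplit r2 := by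
  induction cs with
  | nil => simp at h
  | cons c r ih =>
    rw [List.dropWhile_cons] at h
    by_cases hc : c = '/'
    · rw [if_neg (by simp [hc])] at h
      obtain ⟨h1, h2⟩ := List.cons_eq_cons.mp h
      subst h2
      simp [ssplit, hc]
    · rw [if_pos (by simp [hc])] at h
      cases hr : ssplit r with
      | nil => exact absurd hr (ssplit_ne_nil r)
      | cons a as =>
        have h12 := (ih h).symm.trans hr
        obtain ⟨h1, h2⟩ := List.cons_eq_cons.mp h12
        simp only [ssplit, if_neg hc, hr, List.modifyHead, List.takeWhile_cons]
        simp [hc, ← h1, ← h2]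

theorem tw_no_slash (cs : List Char) (c : Char) (h : c ∈ cs.takeWhile (· ≠ '/')) : c ≠ '/' := by
  have := List.mem_takeWhile_imp h; simpa using this

-- A's loop as an Option-valued zip loop (proof-only reference)
def loopOpt : List String → List (List Char) → PySem.Dict String String →
    Option (PySem.Dict String String)
  | [], _, acc => some acc
  | _, [], acc => some acc
  | r :: rs, p :: ps, acc =>
    if PySem.Str.startswith r "{" && PySem.Str.endswith r "}" then
      loopOpt rs ps (acc.insert (PySem.Str.slice r (some 1) (some (-1))) (String.ofList p))
    else if r.toList = p then loopOpt rs ps acc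
    else none

theorem consumeLit_eq (l cs : List Char) (hl : '/' ∉ l) :
    consumeLit l cs =
      if l <+: cs.takeWhile (· ≠ '/') then
        some ((cs.takeWhile (· ≠ '/')).drop l.length ++ cs.dropWhile (· ≠ '/'))
      else none := by
  induction l generalizing cs with
  | nil => simp [consumeLit, List.takeWhile_append_dropWhile]
  | cons c l ih =>
    have hc : c ≠ '/' := fun h => hl (by simp [h])
    cases cs with
    | nil => simp [consumeLit]
    | cons x cs =>
      simp only [consumeLit]
      by_cases hx : x = c
      · subst hx
        have hxs : (x :: cs).takeWhile (· ≠ '/') = x :: cs.takeWhile (· ≠ '/') := by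
          simp [hc]
        have hds : (x :: cs).dropWhile (· ≠ '/') = cs.dropWhile (· ≠ '/') := by
          simp [hc]
        rw [if_pos rfl, ih cs (fun h => hl (by simp [h])), hxs, hds]
        by_cases hp : l <+: cs.takeWhile (· ≠ '/')
        · rw [if_pos hp, if_pos (by simpa using hp)]
          simp
        · rw [if_neg hp, if_neg (by simpa using hp)]
      · rw [if_neg hx]
        by_cases hx7 : x = '/'
        · have h0 : (x :: cs).takeWhile (· ≠ '/') = [] := by simp [hx7]
          rw [h0, if_neg (by simp)]
        · have hxs : ((x :: cs).takeWhile (· ≠ '/')) = x :: cs.takeWhile (· ≠ '/') := by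
            simp [hx7]
          rw [hxs, if_neg (fun h => hx ((List.cons_prefix_cons.mp h).1).symm)]

theorem bMatch_param_cons (name : String) (rest : List (String × Bool)) (cs : List Char)
    (acc : PySem.Dict String String) :
    bMatch ((name, true) :: rest) cs acc =
      (match rest with
       | [] =>
         if cs.dropWhile (· ≠ '/') = [] then
           some (acc.insert name (String.ofList (cs.takeWhile (· ≠ '/'))))
         else none
       | _ :: _ =>
         match cs.dropWhile (· ≠ '/') with
         | '/' :: cs'' => bMatch rest cs'' (acc.insert name (String.ofList (cs.takeWhile (· ≠ '/'))))
         | _ => none) := by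
  cases rest <;> rfl

theorem bMatch_lit_cons (val : String) (rest : List (String × Bool)) (cs : List Char)
    (acc : PySem.Dict String String) :
    bMatch ((val, false) :: rest) cs acc =
      (match consumeLit val.toList cs with
       | none => none
       | some cs' =>
         match rest with
         | [] => if cs' = [] then some acc else none
         | _ :: _ =>
           match cs' with
           | '/' :: cs'' => bMatch rest cs'' acc
           | _ => none) := by
  cases h : consumeLit val.toList cs <;> cases rest <;> simp only [bMatch, h] <;> rfl

theorem loopOpt_param (r : String) (rs : List String) (p : List Char) (ps : List (List Char))
    (acc : PySem.Dict String String)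
    (hb : (PySem.Str.startswith r "{" && PySem.Str.endswith r "}") = true) :
    loopOpt (r :: rs) (p :: ps) acc =
      loopOpt rs ps (acc.insert (PySem.Str.slice r (some 1) (some (-1))) (String.ofList p)) := by
  simp only [loopOpt]; rw [if_pos hb]

theorem loopOpt_lit_eq (r : String) (rs : List String) (p : List Char) (ps : List (List Char))
    (acc : PySem.Dict String String)
    (hb : (PySem.Str.startswith r "{" && PySem.Str.endswith r "}") = false)
    (he : r.toList = p) :
    loopOpt (r :: rs) (p :: ps) acc = loopOpt rs ps acc := by
  simp only [loopOpt]; rw [if_neg (by rw [hb]; exact Bool.false_ne_true), if_pos he]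

theorem loopOpt_lit_ne (r : String) (rs : List String) (p : List Char) (ps : List (List Char))
    (acc : PySem.Dict String String)
    (hb : (PySem.Str.startswith r "{" && PySem.Str.endswith r "}") = false)
    (hne : r.toList ≠ p) : loopOpt (r :: rs) (p :: ps) acc = none := by
  simp only [loopOpt]
  rw [if_neg (by rw [hb]; exact Bool.false_ne_true), if_neg hne]

theorem bMatch_eq (rs : List String) (cs : List Char) (acc : PySem.Dict String String)
    (hne : rs ≠ []) (hs : ∀ r ∈ rs, '/' ∉ r.toList) :
    bMatch (bTokens rs) cs acc =
      if rs.length = (ssplit cs).length then loopOpt rs (ssplit cs) acc else none := by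
  induction rs generalizing cs acc with
  | nil => exact absurd rfl hne
  | cons r rs' ih =>
    have hr : '/' ∉ r.toList := hs r (by simp)
    have hs' : ∀ x ∈ rs', '/' ∉ x.toList := fun x hx => hs x (by simp [hx])
    by_cases hb : (PySem.Str.startswith r "{" && PySem.Str.endswith r "}") = true
    · rw [show bTokens (r :: rs') =
          (PySem.Str.slice r (some 1) (some (-1)), true) :: bTokens rs' from by
        simp only [bTokens, List.map_cons]; rw [if_pos hb]]
      rw [bMatch_param_cons]
      cases rs' with
      | nil =>
        simp only [bTokens, List.map_nil]
        cases hdw : cs.dropWhile (· ≠ '/') with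
        | nil =>
          rw [if_pos rfl, ssplit_eq_of_dw_nil cs hdw,
            if_pos (by simp), loopOpt_param r [] _ [] acc hb]
          rfl
        | cons x r2 =>
          have h2 : (ssplit r2).length ≠ 0 := by
            simpa [List.length_eq_zero_iff] using ssplit_ne_nil r2
          rw [if_neg (by simp), ssplit_eq_of_dw_cons cs x r2 hdw,
            if_neg (by simp only [List.length_cons, List.length_nil]; omega)]
      | cons s2 ss =>
        obtain ⟨t, ts, htk⟩ : ∃ t ts, bTokens (s2 :: ss) = t :: ts := ⟨_, _, rfl⟩
        rw [htk]
        cases hdw : cs.dropWhile (· ≠ '/') with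
        | nil =>
          rw [ssplit_eq_of_dw_nil cs hdw,
            if_neg (show ¬((r :: s2 :: ss).length =
                ([cs.takeWhile (· ≠ '/')] : List (List Char)).length) from by
              simp only [List.length_cons, List.length_nil]; omega)]
        | cons x r2 =>
          have hx := dropWhile_head_slash cs x r2 hdw
          subst hx
          rw [ssplit_eq_of_dw_cons cs _ r2 hdw]
          show bMatch (t :: ts) r2 _ = _
          rw [← htk, ih r2 _ (by simp) hs']
          have h2 : ssplit r2 ≠ [] := ssplit_ne_nil r2
          by_cases hL : (s2 :: ss).length = (ssplit r2).length
          · rw [if_pos hL, if_pos (by simp only [List.length_cons] at hL ⊢; omega),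
              loopOpt_param r (s2 :: ss) _ (ssplit r2) acc hb]
          · rw [if_neg hL, if_neg (by simp only [List.length_cons] at hL ⊢; omega)]
    · have hbf : (PySem.Str.startswith r "{" && PySem.Str.endswith r "}") = false := by
        simpa using hb
      rw [show bTokens (r :: rs') = (r, false) :: bTokens rs' from by
        simp only [bTokens, List.map_cons]
        rw [if_neg (by rw [hbf]; exact Bool.false_ne_true)]]
      rw [bMatch_lit_cons, consumeLit_eq r.toList cs hr]
      by_cases hp : r.toList <+: cs.takeWhile (· ≠ '/')
      · rw [if_pos hp]
        by_cases heq : r.toList = cs.takeWhile (· ≠ '/')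
        · have hdrop : (cs.takeWhile (· ≠ '/')).drop r.toList.length = [] := by
            rw [heq, List.drop_length]
          rw [hdrop, List.nil_append]
          cases rs' with
          | nil =>
            simp only [bTokens, List.map_nil]
            cases hdw : cs.dropWhile (· ≠ '/') with
            | nil =>
              rw [if_pos rfl, ssplit_eq_of_dw_nil cs hdw, if_pos (by simp),
                loopOpt_lit_eq r [] _ [] acc hbf heq]
              rfl
            | cons x r2 =>
              have h2 : (ssplit r2).length ≠ 0 := by
                simpa [List.length_eq_zero_iff] using ssplit_ne_nil r2
              rw [if_neg (by simp), ssplit_eq_of_dw_cons cs x r2 hdw,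
                if_neg (by simp only [List.length_cons, List.length_nil]; omega)]
          | cons s2 ss =>
            obtain ⟨t, ts, htk⟩ : ∃ t ts, bTokens (s2 :: ss) = t :: ts := ⟨_, _, rfl⟩
            rw [htk]
            cases hdw : cs.dropWhile (· ≠ '/') with
            | nil =>
              rw [ssplit_eq_of_dw_nil cs hdw,
                if_neg (show ¬((r :: s2 :: ss).length =
                    ([cs.takeWhile (· ≠ '/')] : List (List Char)).length) from by
                  simp only [List.length_cons, List.length_nil]; omega)]
            | cons x r2 =>
              have hx := dropWhile_head_slash cs x r2 hdw
              subst hx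
              rw [ssplit_eq_of_dw_cons cs _ r2 hdw]
              show bMatch (t :: ts) r2 _ = _
              rw [← htk, ih r2 _ (by simp) hs']
              by_cases hL : (s2 :: ss).length = (ssplit r2).length
              · rw [if_pos hL, if_pos (by simp only [List.length_cons] at hL ⊢; omega),
                  loopOpt_lit_eq r (s2 :: ss) _ (ssplit r2) acc hbf heq]
              · rw [if_neg hL, if_neg (by simp only [List.length_cons] at hL ⊢; omega)]
        · -- proper prefix: leftover segment chars, never empty and never starting with '/'
          have hlt : r.toList.length < (cs.takeWhile (· ≠ '/')).length :=
            lt_of_le_of_ne hp.length_le (fun h => heq (List.IsPrefix.eq_of_length hp h))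
          cases hd : (cs.takeWhile (· ≠ '/')).drop r.toList.length with
          | nil => exact absurd (List.drop_eq_nil_iff.mp hd) (by omega)
          | cons y t2 =>
            have hy : y ≠ '/' := by
              apply tw_no_slash cs
              have : y ∈ (cs.takeWhile (· ≠ '/')).drop r.toList.length := by
                rw [hd]; simp
              exact List.drop_subset _ _ this
            have hrhs : ∀ T, loopOpt (r :: rs') (cs.takeWhile (· ≠ '/') :: T) acc = none :=
              fun T => loopOpt_lit_ne r rs' _ T acc hbf heq
            cases rs' with
            | nil =>
              simp only [bTokens, List.map_nil]
              rw [if_neg (by simp)]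
              cases hdw : cs.dropWhile (· ≠ '/') with
              | nil => rw [ssplit_eq_of_dw_nil cs hdw, hrhs []]; simp
              | cons x r2 => rw [ssplit_eq_of_dw_cons cs x r2 hdw, hrhs (ssplit r2)]; simp
            | cons s2 ss =>
              obtain ⟨t, ts, htk⟩ : ∃ t ts, bTokens (s2 :: ss) = t :: ts := ⟨_, _, rfl⟩
              rw [htk]
              cases hdw : cs.dropWhile (· ≠ '/') with
              | nil =>
                rw [ssplit_eq_of_dw_nil cs hdw, hrhs []]
                simp only [ite_self]
                split
                · rename_i h3; exact absurd (List.cons_eq_cons.mp h3).1 hy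
                · rfl
              | cons x r2 =>
                rw [ssplit_eq_of_dw_cons cs x r2 hdw, hrhs (ssplit r2)]
                simp only [ite_self]
                split
                · rename_i h3; exact absurd (List.cons_eq_cons.mp h3).1 hy
                · rfl
      · rw [if_neg hp]
        have heq : r.toList ≠ cs.takeWhile (· ≠ '/') := fun h => hp (h ▸ List.prefix_refl _)
        have hrhs : ∀ T, loopOpt (r :: rs') (cs.takeWhile (· ≠ '/') :: T) acc = none :=
          fun T => loopOpt_lit_ne r rs' _ T acc hbf heq
        cases hdw : cs.dropWhile (· ≠ '/') with
        | nil =>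
          rw [ssplit_eq_of_dw_nil cs hdw, hrhs []]
          cases htk : bTokens rs' <;> simp
        | cons x r2 =>
          rw [ssplit_eq_of_dw_cons cs x r2 hdw, hrhs (ssplit r2)]
          cases htk : bTokens rs' <;> simp

theorem loopA_eq (rs : List String) (ps : List (List Char)) (acc : PySem.Dict String String) :
    (pathParamsLoopA (rs.zip (ps.map String.ofList)) acc).items =
      match loopOpt rs ps acc with
      | some d => d.items
      | none => [] := by
  induction rs generalizing ps acc with
  | nil => simp [pathParamsLoopA, loopOpt]
  | cons r rs' ih =>
    cases ps with
    | nil => simp [pathParamsLoopA, loopOpt]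
    | cons p ps' =>
      simp only [List.map_cons, List.zip_cons_cons, pathParamsLoopA, loopOpt]
      by_cases hb : (PySem.Str.startswith r "{" && PySem.Str.endswith r "}") = true
      · rw [if_pos hb, if_pos hb, ih]
      · rw [if_neg hb, if_neg hb]
        by_cases he : r.toList = p
        · have h1 : r = String.ofList p := by rw [← he]; simp
          rw [if_neg (show ¬((r != String.ofList p) = true) from by simp [h1]),
            if_pos he]
          exact ih ps' acc
        · have h1 : r ≠ String.ofList p := fun h => he (by rw [h]; simp)
          rw [if_pos (show (r != String.ofList p) = true from by simp [h1]),
            if_neg he]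
          rfl

-- ===== VERDICT (by name: the statement is the Claim_ definition above) =====
theorem path_params_spec : Claim_equal_path_params := by
  intro route_pattern path _
  unfold Spec_path_params
  simp only [path_params, path_params_alt]
  -- name the shared pieces
  set s := PySem.Str.stripChars (((PySem.Str.splitMax? path "?" 1).getD []).headD "") "/" with hsdef
  set rparts := (PySem.Str.split? (PySem.Str.stripChars route_pattern "/") "/").getD [] with hrp
  have hsplit : ∀ t : String, (PySem.Str.split? t "/").getD [] = (ssplit t.toList).map String.ofList := by
    intro t
    simp [PySem.Str.split?, PySem.Chars.split?, splitOn_eq_ssplit]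
  have hppart : (PySem.Str.split? s "/").getD [] = (ssplit s.toList).map String.ofList := hsplit s
  have hrpart : rparts = (ssplit (PySem.Str.stripChars route_pattern "/").toList).map String.ofList := hsplit _
  have hrne : rparts ≠ [] := by
    rw [hrpart]
    simp [List.map_eq_nil_iff]
    exact ssplit_ne_nil _
  have hrs : ∀ x ∈ rparts, '/' ∉ x.toList := by
    intro x hx
    rw [hrpart] at hx
    obtain ⟨seg, hseg, hxeq⟩ := List.mem_map.mp hx
    subst hxeq
    simpa using ssplit_no_slash _ seg hseg
  rw [bMatch_eq rparts s.toList PySem.Dict.empty hrne hrs, hppart]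
  by_cases hL : rparts.length = (ssplit s.toList).length
  · rw [if_pos hL, if_neg (by simp [hL])]
    rw [hrpart] at hL ⊢
    have := loopA_eq ((ssplit (PySem.Str.stripChars route_pattern "/").toList).map String.ofList)
      (ssplit s.toList) PySem.Dict.empty
    rw [this]
    cases loopOpt ((ssplit (PySem.Str.stripChars route_pattern "/").toList).map String.ofList) (ssplit s.toList) PySem.Dict.empty <;> rfl
  · rw [if_neg hL, if_pos (by simp [hL])]
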